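-- pv_equiv track=rewrite | github.com/MichelleHaase/labs_from_courses | CS50p Problemsets/2/plates.py | only_nums_after_nums
-- ===== SOURCE A (Python) =====
-- def only_nums_after_nums(s):
--     first_num = None
--     check = 0
--     for i in s:
--         if i.isdigit():
--             first_num = i
--             break
--     if first_num != None:
--         index_first_num = s.find(first_num)
--         location_num_in_s = len(s) - index_first_num
--         for i in s[-location_num_in_s:]:
--             if not i.isdigit():
--                 check = 1
--     if check == 1:
--         return False
--     else:
--         return True
-- ===== SOURCE B (Python) =====
-- def only_nums_after_nums(s):
--     seen = False
--     for c in s: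
--         if c.isdigit():
--             seen = True
--         elif seen:
--             return False
--     return True
-- ===== Notes on version B (the rewrite author's own statement) =====
-- stated objective: simpler
-- what changed: Replaced A's two-pass structure (find first digit, recompute its index with str.find, then rescan the negative-index suffix) by a single linear scan with a boolean seen-digit flag and early return.
import Mathlib
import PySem

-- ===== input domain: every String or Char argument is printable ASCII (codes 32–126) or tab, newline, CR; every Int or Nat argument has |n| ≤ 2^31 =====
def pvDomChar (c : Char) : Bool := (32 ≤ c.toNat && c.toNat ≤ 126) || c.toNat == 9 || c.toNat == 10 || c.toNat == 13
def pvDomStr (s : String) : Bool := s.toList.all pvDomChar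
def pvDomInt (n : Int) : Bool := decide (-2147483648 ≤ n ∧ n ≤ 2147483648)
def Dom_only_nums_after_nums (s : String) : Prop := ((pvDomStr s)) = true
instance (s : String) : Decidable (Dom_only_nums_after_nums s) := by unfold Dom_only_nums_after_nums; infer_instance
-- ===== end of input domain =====

-- B changes A's two-pass find-first-digit-then-rescan-suffix structure into one scan with a seen-digit flag; objective: simpler.

-- ===== PORT A =====
-- the first for-loop with break: first digit character of s, if any
def onanFirstDigit : List Char → Option Char
  | [] => none
  | c :: rest => if PySem.Chars.isdigit c then some c else onanFirstDigit rest

def only_nums_after_nums (s : String) : Bool :=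
  let first_num := onanFirstDigit s.toList
  let check : Int := 0
  let check :=
    match first_num with
    | none => check
    | some c =>
      let index_first_num : Int := PySem.Str.find s (String.ofList [c])
      let location_num_in_s : Int := (PySem.Str.len s : Int) - index_first_num
      (PySem.List.slice s.toList (some (-location_num_in_s)) none).foldl
        (fun ch i => if !PySem.Chars.isdigit i then 1 else ch) check
  if check = 1 then false else true

-- ===== PORT B =====
-- single scan with a seen-digit flag (early return = returning false)
def onanScan : List Char → Bool → Bool
  | [], _ => true
  | c :: rest, seen =>
    if PySem.Chars.isdigit c then onanScan rest true
    else if seen then false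
    else onanScan rest seen

def only_nums_after_nums_alt (s : String) : Bool := onanScan s.toList false

-- ===== PRECONDITION & SPEC =====
def Spec_only_nums_after_nums (s : String) (out : Bool) : Prop := out = only_nums_after_nums_alt s
instance (s : String) (out : Bool) : Decidable (Spec_only_nums_after_nums s out) := by unfold Spec_only_nums_after_nums; infer_instance

-- ===== CLAIM (what is proved, stated in full; the proofs are below) =====
def Claim_equal_only_nums_after_nums : Prop := ∀ (s : String), Dom_only_nums_after_nums s → Spec_only_nums_after_nums s (only_nums_after_nums s)

-- ===== LEMMAS AND PROOFS =====

theorem onanScan_true_eq_all (l : List Char) : onanScan l true = l.all PySem.Chars.isdigit := by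
  induction l with
  | nil => rfl
  | cons c rest ih =>
    simp only [onanScan, List.all_cons]
    by_cases h : PySem.Chars.isdigit c <;> simp [h, ih]

theorem onanScan_false_append (pre l : List Char)
    (hpre : ∀ c ∈ pre, PySem.Chars.isdigit c = false) :
    onanScan (pre ++ l) false = onanScan l false := by
  induction pre with
  | nil => rfl
  | cons c rest ih =>
    have hc := hpre c (by simp)
    simp only [List.cons_append, onanScan, hc]
    exact ih (fun x hx => hpre x (by simp [hx]))

theorem onanFirstDigit_none (l : List Char) (h : onanFirstDigit l = none) :
    ∀ c ∈ l, PySem.Chars.isdigit c = false := by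
  induction l with
  | nil => simp
  | cons c rest ih =>
    simp only [onanFirstDigit] at h
    by_cases hc : PySem.Chars.isdigit c
    · simp [hc] at h
    · simp only [hc] at h
      intro x hx
      rcases List.mem_cons.mp hx with rfl | hx
      · simpa using hc
      · exact ih (by simpa [hc] using h) x hx

theorem onanFirstDigit_some (l : List Char) (c : Char) (h : onanFirstDigit l = some c) :
    ∃ pre rest, l = pre ++ c :: rest ∧ (∀ x ∈ pre, PySem.Chars.isdigit x = false) ∧
      PySem.Chars.isdigit c = true := by
  induction l with
  | nil => simp [onanFirstDigit] at h
  | cons a rest ih =>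
    simp only [onanFirstDigit] at h
    by_cases ha : PySem.Chars.isdigit a
    · simp only [ha, if_pos] at h
      obtain rfl := Option.some.inj h
      exact ⟨[], rest, by simp, by simp, ha⟩
    · simp only [ha] at h
      obtain ⟨pre, rest', heq, hpre, hc⟩ := ih (by simpa [ha] using h)
      exact ⟨a :: pre, rest', by simp [heq], by
        intro x hx
        rcases List.mem_cons.mp hx with rfl | hx
        · simpa using ha
        · exact hpre x hx, hc⟩

-- A's check-accumulating fold
theorem onanFold_eq (l : List Char) (a : Int) :
    l.foldl (fun ch i => if !PySem.Chars.isdigit i then 1 else ch) a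
      = if l.all PySem.Chars.isdigit then a else 1 := by
  induction l generalizing a with
  | nil => simp
  | cons c rest ih =>
    rw [List.foldl_cons, List.all_cons]
    by_cases hc : PySem.Chars.isdigit c
    · rw [hc, show (if (!true : Bool) = true then (1:Int) else a) = a from rfl, ih,
        Bool.true_and]
    · have hc' : PySem.Chars.isdigit c = false := by simpa using hc
      rw [hc', show (if (!false : Bool) = true then (1:Int) else a) = 1 from rfl, ih,
        Bool.false_and]
      simp

-- s.find(c) points at pre.length when l = pre ++ c :: rest with c a digit, pre digit-free
theorem onanFind_eq (pre rest : List Char) (c : Char)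
    (hpre : ∀ x ∈ pre, PySem.Chars.isdigit x = false) (hc : PySem.Chars.isdigit c = true) :
    PySem.Chars.find (pre ++ c :: rest) [c] = (pre.length : Int) := by
  set l := pre ++ c :: rest with hl
  have hinfix : [c] <:+: l := ⟨pre, rest, by simp [hl]⟩
  have hnn : 0 ≤ PySem.Chars.find l [c] := (PySem.Chars.find_nonneg_iff l [c]).mpr hinfix
  obtain ⟨hpref, hmin⟩ := PySem.Chars.find_spec (s := l) (sub := [c]) hnn
  -- at pre.length the prefix holds
  have hat : [c] <+: l.drop pre.length := by
    simp [hl, List.drop_append_of_le_length (le_refl pre.length)]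
  -- minimality gives find ≤ pre.length
  have hle : (PySem.Chars.find l [c]).toNat ≤ pre.length := by
    by_contra hgt
    exact absurd hat (hmin pre.length (by omega))
  -- and find can't be < pre.length: the char there would be a digit-free char equal to c
  have hge : pre.length ≤ (PySem.Chars.find l [c]).toNat := by
    generalize hj : (PySem.Chars.find l [c]).toNat = j at hpref ⊢
    by_contra hlt
    rw [Nat.not_le] at hlt
    rw [hl, List.drop_append_of_le_length (by omega), List.drop_eq_getElem_cons hlt] at hpref
    simp only [List.cons_append] at hpref
    have hhead : c = pre[j] := (List.cons_prefix_cons.mp hpref).1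
    have hmem : c ∈ pre := hhead ▸ List.getElem_mem _
    have := hpre c hmem
    rw [hc] at this; exact absurd this (by simp)
  omega

-- ===== VERDICT (by name: the statement is the Claim_ definition above) =====
theorem only_nums_after_nums_spec : Claim_equal_only_nums_after_nums := by
  intro s _
  unfold Spec_only_nums_after_nums only_nums_after_nums only_nums_after_nums_alt
  cases hfd : onanFirstDigit s.toList with
  | none =>
    have hall := onanFirstDigit_none _ hfd
    have hB : onanScan s.toList false = true := by
      simpa using onanScan_false_append s.toList [] hall
    simp [hfd, hB]
  | some c =>
    obtain ⟨pre, rest, heq, hpre, hc⟩ := onanFirstDigit_some _ _ hfd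
    have hB : onanScan s.toList false = rest.all PySem.Chars.isdigit := by
      rw [heq, onanScan_false_append pre (c :: rest) hpre]
      simp only [onanScan, hc, if_pos]
      exact onanScan_true_eq_all rest
    simp only [hfd, PySem.Str.find_eq, PySem.Str.len_eq,
      show (String.ofList [c]).toList = [c] from by simp]
    have hval : List.foldl (fun ch i => if !PySem.Chars.isdigit i then 1 else ch) (0 : Int)
        (PySem.List.slice s.toList
          (some (-((s.toList.length : Int) - PySem.Chars.find s.toList [c]))) none)
        = if rest.all PySem.Chars.isdigit then 0 else 1 := by
      have hfind : PySem.Chars.find s.toList [c] = (pre.length : Int) := by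
        rw [heq]
        exact onanFind_eq pre rest c hpre hc
      rw [hfind, heq]
      have hneg : -(((pre ++ c :: rest).length : Int) - (pre.length : Int))
          = -(((rest.length + 1 : Nat) : Int)) := by
        simp [List.length_append]
      rw [hneg, PySem.List.slice_from_neg_natCast _ _ (by omega)]
      have hdropn : (pre ++ c :: rest).length - (rest.length + 1) = pre.length := by
        simp [List.length_append]
      rw [hdropn, List.drop_left, onanFold_eq, List.all_cons, hc, Bool.true_and]
    rw [hval, hB]
    by_cases hr : rest.all PySem.Chars.isdigit
    · simp [hr]
    · have hr' : rest.all PySem.Chars.isdigit = false := by simpa using hr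
      simp [hr']
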